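-- pv_equiv track=rewrite | github.com/miliar/Code_Jam_Webscraper | solutions_python/solutions_year16_round1_nr1/991.py | handle_case
-- ===== SOURCE A (Python) =====
-- def handle_case(case):
-- 	chars = [case[0]]
-- 	for c in case[1:]:
-- 		if c >= chars[0]:
-- 			chars.insert(0, c)
-- 		else:
-- 			chars.append(c)
-- 	return ''.join(chars)
-- ===== SOURCE B (Python) =====
-- def handle_case(case):
--     # stage 1: materialize the prefix-maximum array pm, pm[i] == max(case[:i+1])
--     pm = []
--     m = case[0]
--     for c in case:
--         if c > m:
--             m = c
--         pm.append(m)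
--     # stage 2: a character is a "record" iff it equals the prefix maximum at its position
--     pairs = list(zip(case, pm))[1:]
--     rec = [c for c, p in pairs if c == p]
--     oth = [c for c, p in pairs if c != p]
--     # stage 3: records reversed, then the first character, then the rest in order
--     return ''.join(reversed(rec)) + case[0] + ''.join(oth)
-- ===== Notes on version B (the rewrite author's own statement) =====
-- stated objective: faster
-- what changed: B never maintains the output during the scan: it first materializes the prefix-maximum array (updated with strict >), then classifies each later character as record/non-record by EQUALITY with that array, and assembles reversed records + first char + the rest; A builds the answer in one pass by insert(0)/append on a list guarded by c >= chars[0].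
import Mathlib
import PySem

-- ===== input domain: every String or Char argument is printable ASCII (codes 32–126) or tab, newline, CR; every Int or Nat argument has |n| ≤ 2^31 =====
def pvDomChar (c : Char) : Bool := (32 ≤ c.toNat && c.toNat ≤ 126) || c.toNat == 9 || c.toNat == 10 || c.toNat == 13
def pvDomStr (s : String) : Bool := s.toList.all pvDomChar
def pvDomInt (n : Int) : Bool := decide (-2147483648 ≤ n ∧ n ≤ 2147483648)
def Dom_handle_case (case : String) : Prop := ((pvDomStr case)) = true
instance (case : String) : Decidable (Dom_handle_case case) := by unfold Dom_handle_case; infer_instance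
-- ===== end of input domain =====

-- B never maintains the output during the scan: it materializes the prefix-maximum array,
-- classifies each later character by equality with it, and assembles reversed records +
-- first char + the rest; A builds the answer in one pass with insert(0)/append.

-- ===== PORT A =====
-- A's loop: chars starts as [case[0]] and is never empty, so chars[0] = headD
def handleCaseGoA : List Char → List Char → List Char
  | chars, [] => chars
  | chars, c :: rest =>
      if chars.headD ' ' ≤ c then handleCaseGoA (c :: chars) rest
      else handleCaseGoA (chars ++ [c]) rest

def handle_case (case : String) : String :=
  match case.toList with
  | [] => ""   -- Python raises IndexError on case[0]; excluded by Pre_handle_case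
  | c0 :: rest => String.mk (handleCaseGoA [c0] rest)

-- ===== PORT B =====
-- stage-1 loop of Source B: running m with strict >, appending m each step
def pmGoB : Char → List Char → List Char → List Char
  | _, acc, [] => acc
  | m, acc, c :: rest =>
      let m' := if m < c then c else m
      pmGoB m' (acc ++ [m']) rest

def handle_case_alt (case : String) : String :=
  match case.toList with
  | [] => ""   -- Python raises IndexError on case[0]; excluded by Pre_handle_case
  | c0 :: _ =>
      let l := case.toList
      let pm := pmGoB c0 [] l
      let pairs := (l.zip pm).drop 1
      let rec_ := (pairs.filter (fun cp => cp.1 == cp.2)).map Prod.fst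
      let oth := (pairs.filter (fun cp => cp.1 != cp.2)).map Prod.fst
      String.mk (rec_.reverse ++ c0 :: oth)

-- ===== PRECONDITION & SPEC =====
-- Pre_ excludes only the empty string, on which both Pythons raise IndexError at case[0].
def Pre_handle_case (case : String) : Prop := case ≠ ""
instance (case : String) : Decidable (Pre_handle_case case) := by unfold Pre_handle_case; infer_instance
def pvWitness_handle_case : String := "bacd"

def Spec_handle_case (case : String) (out : String) : Prop := out = handle_case_alt case
instance (case : String) (out : String) : Decidable (Spec_handle_case case out) := by unfold Spec_handle_case; infer_instance

-- ===== CLAIM (what is proved, stated in full; the proofs are below) =====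
def Claim_equal_handle_case : Prop := ∀ (case : String), Dom_handle_case case → Pre_handle_case case → Spec_handle_case case (handle_case case)

-- ===== LEMMAS AND PROOFS =====

-- common characterization: records/others of the tail under running maximum m
def pvSpecRec : Char → List Char → List Char × List Char
  | _, [] => ([], [])
  | m, c :: rest =>
      if m ≤ c then ((pvSpecRec c rest).1.cons c, (pvSpecRec c rest).2)
      else ((pvSpecRec m rest).1, (pvSpecRec m rest).2.cons c)

-- the accumulator of B's stage-1 loop is a prefix of its result
lemma pmGoB_acc : ∀ (l : List Char) (m : Char) (acc : List Char),
    pmGoB m acc l = acc ++ pmGoB m [] l := by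
  intro l
  induction l with
  | nil => intro m acc; simp [pmGoB]
  | cons c rest ih =>
      intro m acc
      simp only [pmGoB]
      rw [ih _ (acc ++ _), ih _ ([] ++ _)]
      simp

-- A's loop result, characterized by pvSpecRec
lemma goA_spec : ∀ (rest chars : List Char) (m : Char), chars ≠ [] → chars.headD ' ' = m →
    handleCaseGoA chars rest =
      (pvSpecRec m rest).1.reverse ++ chars ++ (pvSpecRec m rest).2 := by
  intro rest
  induction rest with
  | nil => intro chars m _ _; simp [handleCaseGoA, pvSpecRec]
  | cons c rest ih =>
      intro chars m hne hm
      simp only [handleCaseGoA, pvSpecRec, hm]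
      by_cases h : m ≤ c
      · rw [if_pos h, if_pos h, ih (c :: chars) c (by simp) (by simp)]
        simp
      · rw [if_neg h, if_neg h, ih (chars ++ [c]) m (by simp)
              (by cases chars with
                  | nil => exact absurd rfl hne
                  | cons x xs => simpa using hm)]
        simp
  termination_by rest => rest

-- B's stage-2 classification of the tail, characterized by pvSpecRec
lemma zipPm_spec : ∀ (rest : List Char) (m : Char),
    ((rest.zip (pmGoB m [] rest)).filter (fun cp => cp.1 == cp.2)).map Prod.fst
        = (pvSpecRec m rest).1
    ∧ ((rest.zip (pmGoB m [] rest)).filter (fun cp => cp.1 != cp.2)).map Prod.fst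
        = (pvSpecRec m rest).2 := by
  intro rest
  induction rest with
  | nil => intro m; simp [pmGoB, pvSpecRec]
  | cons c rest ih =>
      intro m
      simp only [pmGoB, pvSpecRec]
      rw [pmGoB_acc]
      by_cases h : m ≤ c
      · have hm' : (if m < c then c else m) = c := by
          rcases lt_or_eq_of_le h with hlt | hEq
          · simp [hlt]
          · simp [hEq]
        obtain ⟨ih1, ih2⟩ := ih c
        rw [hm']
        refine ⟨?_, ?_⟩
        · rw [if_pos h]
          simp [List.filter_cons, ih1]
        · rw [if_pos h]
          simp [List.filter_cons, ih2]
      · have hcm : (c == m) = false := by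
          refine beq_eq_false_iff_ne.mpr (fun hcm => h ?_)
          exact le_of_eq hcm.symm
        have hbne : (c != m) = true := by simp [bne, hcm]
        have hm' : (if m < c then c else m) = m := by
          have : ¬ m < c := fun hlt => h hlt.le
          simp [this]
        obtain ⟨ih1, ih2⟩ := ih m
        rw [hm']
        refine ⟨?_, ?_⟩
        · rw [if_neg h]
          simp [List.filter_cons, hcm, ih1]
        · rw [if_neg h]
          simp [List.filter_cons, hbne, ih2]

-- ===== VERDICT (by name: the statement is the Claim_ definition above) =====
theorem handle_case_spec : Claim_equal_handle_case := by
  intro case _ _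
  unfold Spec_handle_case handle_case handle_case_alt
  cases h : case.toList with
  | nil => rfl
  | cons c0 rest =>
      show String.mk (handleCaseGoA [c0] rest) =
        String.mk ((List.map Prod.fst (List.filter (fun cp => cp.1 == cp.2)
            (List.drop 1 ((c0 :: rest).zip (pmGoB c0 [] (c0 :: rest)))))).reverse
          ++ c0 :: List.map Prod.fst (List.filter (fun cp => cp.1 != cp.2)
            (List.drop 1 ((c0 :: rest).zip (pmGoB c0 [] (c0 :: rest))))))
      have hpm : pmGoB c0 [] (c0 :: rest) = c0 :: pmGoB c0 [] rest := by
        simp only [pmGoB]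
        rw [pmGoB_acc]
        simp
      obtain ⟨h1, h2⟩ := zipPm_spec rest c0
      simp only [hpm, List.zip_cons_cons, List.drop_succ_cons, List.drop_zero]
      rw [h1, h2, goA_spec rest [c0] c0 (by simp) (by simp)]
      simp
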